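-- pv_equiv track=rewrite | github.com/ancasp/proiect_final_anca | pythonProject/python_intermediate/iterators_generators - task.py | get_n_divizibile
-- ===== SOURCE A (Python) =====
-- def is_divizibil(n):
--     if n % 7 == 0:
--         return True
--
--     return False
--
-- def get_n_divizibile(n):
--     divizibile_cu7 = []
--     i = 7
--     while len(divizibile_cu7) < n:
--         if is_divizibil(i):
--             divizibile_cu7.append(i)
--
--         i += 1
--     return divizibile_cu7
-- ===== SOURCE B (Python) =====
-- def get_n_divizibile(n):
--     return [7 * i for i in range(1, n + 1)]
-- ===== Notes on version B (the rewrite author's own statement) =====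
-- stated objective: faster
-- what changed: B enumerates the multiples of 7 directly as a closed-form comprehension [7*i for i in range(1, n+1)], eliminating A's scan over all integers with a divisibility test.
import Mathlib
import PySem

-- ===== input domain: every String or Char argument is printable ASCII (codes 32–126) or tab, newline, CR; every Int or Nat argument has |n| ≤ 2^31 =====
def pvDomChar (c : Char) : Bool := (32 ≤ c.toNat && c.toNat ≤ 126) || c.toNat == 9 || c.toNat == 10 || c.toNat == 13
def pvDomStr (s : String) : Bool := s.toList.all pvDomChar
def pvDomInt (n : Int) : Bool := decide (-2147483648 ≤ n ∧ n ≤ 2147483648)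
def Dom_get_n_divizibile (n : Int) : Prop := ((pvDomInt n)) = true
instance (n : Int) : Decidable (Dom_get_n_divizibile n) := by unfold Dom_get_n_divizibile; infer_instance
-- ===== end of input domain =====

-- B replaces A's scan-over-integers-with-divisibility-test by the closed-form list [7*i for i in range(1, n+1)].

-- ===== PORT A =====
def is_divizibil (n : Int) : Bool :=
  if PySem.Int.mod n 7 = 0 then true else false

-- A's while loop, step for step; the fuel only bounds the number of iterations
-- (7 * n.toNat always suffices: the loop visits i = 7 .. 7n, one fuel per iteration — proved in pvLoopA_closed).
def pvLoopA (fuel : Nat) (n : Int) (acc : List Int) (i : Int) : List Int :=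
  match fuel with
  | 0 => acc
  | fuel + 1 =>
    if (acc.length : Int) < n then
      if is_divizibil i then pvLoopA fuel n (acc ++ [i]) (i + 1)
      else pvLoopA fuel n acc (i + 1)
    else acc

def get_n_divizibile (n : Int) : List Int :=
  pvLoopA (7 * n.toNat) n [] 7

-- ===== PORT B =====
def get_n_divizibile_alt (n : Int) : List Int :=
  (PySem.List.pyRange 1 (n + 1) 1).map (fun i => 7 * i)

-- ===== PRECONDITION & SPEC =====
def Spec_get_n_divizibile (n : Int) (out : List Int) : Prop := out = get_n_divizibile_alt n
instance (n : Int) (out : List Int) : Decidable (Spec_get_n_divizibile n out) := by unfold Spec_get_n_divizibile; infer_instance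

-- ===== CLAIM (what is proved, stated in full; the proofs are below) =====
def Claim_equal_get_n_divizibile : Prop := ∀ (n : Int), Dom_get_n_divizibile n → Spec_get_n_divizibile n (get_n_divizibile n)

-- ===== LEMMAS AND PROOFS =====

-- Six consecutive non-multiples are skipped: starting j < 7 below the multiple 7(m+1), the loop
-- reaches 7(m+1) with the list unchanged, spending j fuel.
lemma pvLoopA_skip (n : Int) (acc : List Int) (m : Int) :
    ∀ j : Nat, j ≤ 6 → ∀ fuel : Nat,
      pvLoopA (fuel + j) n acc (7 * (m + 1) - j) = pvLoopA fuel n acc (7 * (m + 1)) := by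
  intro j
  induction j with
  | zero => intro _ fuel; simp
  | succ j ih =>
    intro hj fuel
    by_cases hlt : (acc.length : Int) < n
    · have hdiv : is_divizibil (7 * (m + 1) - (j + 1 : Nat)) = false := by
        unfold is_divizibil
        rw [PySem.Int.mod_eq_emod_of_pos (by norm_num)]
        rw [if_neg]
        omega
      have harg : 7 * (m + 1) - (j + 1 : Nat) + 1 = 7 * (m + 1) - (j : Nat) := by push_cast; ring
      show pvLoopA (fuel + j + 1) n acc (7 * (m + 1) - (j + 1 : Nat)) = _
      rw [pvLoopA, if_pos hlt, hdiv]
      simp only [Bool.false_eq_true, if_false]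
      rw [harg, ih (by omega) fuel]
    · show pvLoopA (fuel + j + 1) n acc (7 * (m + 1) - (j + 1 : Nat)) = _
      rw [pvLoopA, if_neg hlt]
      cases fuel with
      | zero => rfl
      | succ f => rw [pvLoopA, if_neg hlt]

-- One full round: at a multiple 7(m+1) with room left, append it and arrive at the next multiple
-- 7(m+2), spending 7 fuel.
lemma pvLoopA_step (n : Int) (acc : List Int) (m : Int) (fuel : Nat) (h : (acc.length : Int) < n) :
    pvLoopA (fuel + 7) n acc (7 * (m + 1)) = pvLoopA fuel n (acc ++ [7 * (m + 1)]) (7 * (m + 2)) := by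
  have hmod : PySem.Int.mod (7 * (m + 1)) 7 = 0 := by
    rw [PySem.Int.mod_eq_emod_of_pos (by norm_num)]
    omega
  have hdiv : is_divizibil (7 * (m + 1)) = true := by unfold is_divizibil; rw [hmod]; simp
  show pvLoopA (fuel + 6 + 1) n acc (7 * (m + 1)) = _
  rw [pvLoopA, if_pos h, hdiv]
  simp only [if_true]
  have harg : 7 * (m + 1) + 1 = 7 * ((m + 1) + 1) - (6 : Nat) := by push_cast; ring
  rw [harg, pvLoopA_skip n _ (m + 1) 6 (by norm_num) fuel]
  congr 1
  ring

-- The loop from state (acc, 7(m+1)) with fuel 7k + c appends exactly the next k = n - |acc| multiples of 7.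
lemma pvLoopA_closed (k : Nat) :
    ∀ (c : Nat) (n : Int) (acc : List Int) (m : Int), (n - acc.length).toNat = k →
      pvLoopA (7 * k + c) n acc (7 * (m + 1)) =
        acc ++ (PySem.List.pyRange (m + 1) (m + 1 + k) 1).map (fun j => 7 * j) := by
  induction k with
  | zero =>
    intro c n acc m hk
    have hlt : ¬ ((acc.length : Int) < n) := by omega
    rw [PySem.List.pyRange_one_eq_nil (by omega)]
    simp only [List.map_nil, List.append_nil, Nat.mul_zero, Nat.zero_add]
    cases c with
    | zero => rfl
    | succ f => rw [pvLoopA, if_neg hlt]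
  | succ k ih =>
    intro c n acc m hk
    have hlt : (acc.length : Int) < n := by omega
    have hfuel : 7 * (k + 1) + c = (7 * k + c) + 7 := by ring
    rw [hfuel, pvLoopA_step n acc m (7 * k + c) hlt]
    have hk' : (n - ((acc ++ [7 * (m + 1)]).length : Int)).toNat = k := by
      simp; omega
    rw [show (7 : Int) * (m + 2) = 7 * ((m + 1) + 1) from by ring]
    rw [ih c n (acc ++ [7 * (m + 1)]) (m + 1) hk']
    rw [PySem.List.pyRange_one_cons (a := m + 1) (b := m + 1 + (k + 1 : Nat)) (by push_cast; omega)]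
    have : m + 1 + 1 + (k : Int) = m + 1 + ((k : Nat) + 1 : Nat) := by push_cast; ring
    simp only [List.map_cons, List.append_assoc, List.singleton_append]
    congr 2
    push_cast
    ring_nf

-- ===== VERDICT (by name: the statement is the Claim_ definition above) =====
theorem get_n_divizibile_spec : Claim_equal_get_n_divizibile := by
  intro n _
  unfold Spec_get_n_divizibile get_n_divizibile get_n_divizibile_alt
  rw [show pvLoopA (7 * n.toNat) n [] 7 = pvLoopA (7 * n.toNat + 0) n [] (7 * (0 + 1)) by norm_num]
  rw [pvLoopA_closed n.toNat 0 n [] 0 (by simp)]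
  rw [PySem.List.pyRange_one, PySem.List.pyRange_one]
  simp only [zero_add]
  rw [show (1 + (n.toNat : Int) - 1) = (n.toNat : Int) by ring, show (n + 1 - 1 : Int) = n by ring]
  have hmx : (max n 0).toNat = n.toNat := by omega
  simp [hmx]
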